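-- pv_equiv track=rewrite | github.com/pypi-data/pypi-mirror-392 | packages/siada-cli/siada_cli-1.5.6.tar.gz/siada_cli-1.5.6/siada/services/file_recommendation/utils/text_utils.py | find_at_commands_in_text
-- ===== SOURCE A (Python) =====
-- from typing import List, Tuple, Optional
--
-- def is_at_command_start(text: str, position: int) -> bool:
--     """
--     Check if position is at the start of an @ command
--
--     Args:
--         text: Input text
--         position: Position to check
--
--     Returns:
--         bool: True if position is at @ command start
--     """
--     if position >= len(text) or text[position] != '@':
--         return False
--
--     # Check if @ is escaped
--     if position > 0 and text[position - 1] == '\\':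
--         return False
--
--     return True
--
-- def find_at_commands_in_text(text: str) -> List[Tuple[int, str]]:
--     """
--     Find all @ commands in text
--
--     Args:
--         text: Input text
--
--     Returns:
--         List[Tuple[int, str]]: List of (position, at_command) tuples
--     """
--     commands = []
--     i = 0
--
--     while i < len(text):
--         if text[i] == '@' and is_at_command_start(text, i):
--             # Find end of command
--             j = i + 1
--             while j < len(text) and not text[j].isspace():
--                 if text[j] == '\\' and j + 1 < len(text):
--                     j += 2  # Skip escaped character
--                 else:
--                     j += 1
--
--             command = text[i:j]
--             commands.append((i, command))
--             i = j
--         else: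
--             i += 1
--
--     return commands
-- ===== SOURCE B (Python) =====
-- def find_at_commands_in_text(text):
--     """Find all @ commands in text as (position, command) pairs.
--
--     One-pass character DFA: OUT / IN / ESC states with an incremental
--     buffer, instead of index jumps and slicing.
--     """
--     commands = []
--     state = 0  # 0 = outside, 1 = inside command, 2 = just saw backslash inside
--     start = 0
--     buf = []
--     prev = ''
--     for p, c in enumerate(text):
--         if state == 0:
--             if c == '@' and prev != '\\':
--                 state, start, buf = 1, p, ['@']
--         elif state == 1:
--             if c == '\\':
--                 state = 2
--                 buf.append(c)
--             elif c.isspace():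
--                 commands.append((start, ''.join(buf)))
--                 state = 0
--             else:
--                 buf.append(c)
--         else:
--             buf.append(c)
--             state = 1
--         prev = c
--     if state:
--         commands.append((start, ''.join(buf)))
--     return commands
-- ===== Notes on version B (the rewrite author's own statement) =====
-- stated objective: alternative
-- what changed: Replaces A's index-jumping scanner (helper lookbehind check, inner while loop with j+=2 escape skips, and text[i:j] slicing) by a single character-at-a-time DFA over enumerate(text) with OUT/IN/ESC states and an incrementally built command buffer (no per-command helper call or slicing).
import Mathlib
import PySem

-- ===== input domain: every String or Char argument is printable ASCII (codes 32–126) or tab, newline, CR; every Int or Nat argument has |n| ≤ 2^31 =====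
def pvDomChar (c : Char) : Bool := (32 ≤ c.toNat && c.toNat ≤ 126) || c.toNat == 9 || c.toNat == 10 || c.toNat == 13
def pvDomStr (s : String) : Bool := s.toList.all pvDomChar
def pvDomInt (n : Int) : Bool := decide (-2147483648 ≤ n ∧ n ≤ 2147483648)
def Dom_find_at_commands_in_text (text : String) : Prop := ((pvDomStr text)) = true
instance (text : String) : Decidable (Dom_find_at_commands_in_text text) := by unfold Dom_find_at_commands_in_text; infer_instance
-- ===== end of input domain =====

-- B replaces A's index-jumping scanner (helper + inner while + slicing) by a single
-- character-at-a-time DFA (OUT/IN/ESC states) with an incremental buffer; objective: alternative.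

-- ===== PORT A =====
-- A works with string indices i, j that are always in [0, len]; indexing is ported as
-- List.getD on text.toList (exact: every access in A is in range) and text[i:j] as
-- PySem.List.slice.

def pvA_isStart (cs : List Char) (position : Nat) : Bool :=
  -- is_at_command_start (position ≥ 0 always at call sites)
  if position ≥ cs.length ∨ cs.getD position ' ' ≠ '@' then false
  else if position > 0 ∧ cs.getD (position - 1) ' ' = '\\' then false
  else true

def pvA_findEnd (cs : List Char) (j : Nat) : Nat :=
  -- the inner `while j < len(text) and not text[j].isspace()` loop, returning the final j
  if _h : j < cs.length then
    if ¬ (PySem.Chars.isspace (cs.getD j ' ') = true) then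
      if cs.getD j ' ' = '\\' ∧ j + 1 < cs.length then pvA_findEnd cs (j + 2)
      else pvA_findEnd cs (j + 1)
    else j
  else j
termination_by cs.length - j

theorem pvA_findEnd_ge (cs : List Char) (j : Nat) : j ≤ pvA_findEnd cs j := by
  unfold pvA_findEnd
  split
  · split
    · split
      · exact le_trans (by omega) (pvA_findEnd_ge cs (j + 2))
      · exact le_trans (by omega) (pvA_findEnd_ge cs (j + 1))
    · exact le_refl j
  · exact le_refl j
termination_by cs.length - j

def pvA_go (cs : List Char) (i : Nat) : List (Int × String) :=
  -- the outer `while i < len(text)` loop; `commands` is built by cons + recursion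
  if _h : i < cs.length then
    if cs.getD i ' ' = '@' ∧ pvA_isStart cs i = true then
      let j := pvA_findEnd cs (i + 1)
      ((i : Int), String.ofList (PySem.List.slice cs (some (i : Int)) (some (j : Int)))) :: pvA_go cs j
    else pvA_go cs (i + 1)
  else []
termination_by cs.length - i
decreasing_by
  · have := pvA_findEnd_ge cs (i + 1); omega
  · omega

def find_at_commands_in_text (text : String) : List (Int × String) :=
  pvA_go text.toList 0

-- ===== PORT B =====
-- Source B's for-loop over enumerate(text) as structural recursion on the remaining chars;
-- p is the current position, st the DFA state (0 out / 1 in / 2 escape), buf the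
-- accumulated command characters (''.join(buf) = String.ofList buf, exact), prev the
-- previously seen character (None at the start).

def pvB_go (rest : List Char) (p : Nat) (st : Nat) (start : Nat) (buf : List Char)
    (prev : Option Char) (acc : List (Int × String)) : List (Int × String) :=
  match rest with
  | [] => if st ≠ 0 then acc ++ [((start : Int), String.ofList buf)] else acc
  | c :: rs =>
    if st = 0 then
      if c = '@' ∧ prev ≠ some '\\' then pvB_go rs (p + 1) 1 p ['@'] (some c) acc
      else pvB_go rs (p + 1) 0 start buf (some c) acc
    else if st = 1 then
      if c = '\\' then pvB_go rs (p + 1) 2 start (buf ++ [c]) (some c) acc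
      else if PySem.Chars.isspace c then
        pvB_go rs (p + 1) 0 start buf (some c) (acc ++ [((start : Int), String.ofList buf)])
      else pvB_go rs (p + 1) 1 start (buf ++ [c]) (some c) acc
    else pvB_go rs (p + 1) 1 start (buf ++ [c]) (some c) acc

def find_at_commands_in_text_alt (text : String) : List (Int × String) :=
  pvB_go text.toList 0 0 0 [] none []

-- ===== PRECONDITION & SPEC =====
def Spec_find_at_commands_in_text (text : String) (out : List (Int × String)) : Prop := out = find_at_commands_in_text_alt text
instance (text : String) (out : List (Int × String)) : Decidable (Spec_find_at_commands_in_text text out) := by unfold Spec_find_at_commands_in_text; infer_instance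

-- ===== CLAIM (what is proved, stated in full; the proofs are below) =====
def Claim_equal_find_at_commands_in_text : Prop := ∀ (text : String), Dom_find_at_commands_in_text text → Spec_find_at_commands_in_text text (find_at_commands_in_text text)

-- ===== LEMMAS AND PROOFS =====

theorem pvA_findEnd_le (cs : List Char) (j : Nat) (h : j ≤ cs.length) :
    pvA_findEnd cs j ≤ cs.length := by
  unfold pvA_findEnd
  split
  · split
    · split
      · exact pvA_findEnd_le cs (j + 2) (by omega)
      · exact pvA_findEnd_le cs (j + 1) (by omega)
    · exact h
  · exact h
termination_by cs.length - j

theorem pvA_findEnd_isspace (cs : List Char) (j : Nat) :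
    pvA_findEnd cs j < cs.length →
    PySem.Chars.isspace (cs.getD (pvA_findEnd cs j) ' ') = true := by
  unfold pvA_findEnd
  split
  · split
    · split
      · exact pvA_findEnd_isspace cs (j + 2)
      · exact pvA_findEnd_isspace cs (j + 1)
    · rename_i hsp
      intro _
      simpa using hsp
  · intro h
    omega
termination_by cs.length - j

theorem pvA_findEnd_step (cs : List Char) (k : Nat) (h : k < cs.length) :
    pvA_findEnd cs k =
      if ¬ PySem.Chars.isspace (cs.getD k ' ') = true then
        (if cs.getD k ' ' = '\\' ∧ k + 1 < cs.length then pvA_findEnd cs (k + 2)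
         else pvA_findEnd cs (k + 1))
      else k := by
  conv_lhs => rw [pvA_findEnd]
  rw [dif_pos h]

theorem pvA_findEnd_stop (cs : List Char) (k : Nat) (h : ¬ k < cs.length) :
    pvA_findEnd cs k = k := by
  rw [pvA_findEnd]
  simp [h]


-- one-step equation lemmas for the two loop bodies
theorem pvA_go_stop (cs : List Char) (i : Nat) (h : ¬ i < cs.length) :
    pvA_go cs i = [] := by
  rw [pvA_go]; simp [h]

theorem pvA_go_hit (cs : List Char) (i : Nat) (h : i < cs.length)
    (hc : cs.getD i ' ' = '@' ∧ pvA_isStart cs i = true) :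
    pvA_go cs i = ((i : Int), String.ofList (PySem.List.slice cs (some (i : Int))
        (some ((pvA_findEnd cs (i + 1) : Nat) : Int)))) :: pvA_go cs (pvA_findEnd cs (i + 1)) := by
  conv_lhs => rw [pvA_go]
  rw [dif_pos h, if_pos hc]

theorem pvA_go_miss (cs : List Char) (i : Nat) (h : i < cs.length)
    (hc : ¬ (cs.getD i ' ' = '@' ∧ pvA_isStart cs i = true)) :
    pvA_go cs i = pvA_go cs (i + 1) := by
  conv_lhs => rw [pvA_go]
  rw [dif_pos h, if_neg hc]

theorem pvB_nil (p st start : Nat) (buf : List Char) (prev : Option Char)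
    (acc : List (Int × String)) :
    pvB_go [] p st start buf prev acc =
      if st ≠ 0 then acc ++ [((start : Int), String.ofList buf)] else acc := rfl

theorem pvB_step0_at (c : Char) (rs : List Char) (p start : Nat) (buf : List Char)
    (prev : Option Char) (acc : List (Int × String)) (hc : c = '@' ∧ prev ≠ some '\\') :
    pvB_go (c :: rs) p 0 start buf prev acc = pvB_go rs (p + 1) 1 p ['@'] (some c) acc := by
  rw [pvB_go]; rw [if_pos rfl, if_pos hc]

theorem pvB_step0_skip (c : Char) (rs : List Char) (p start : Nat) (buf : List Char)
    (prev : Option Char) (acc : List (Int × String)) (hc : ¬ (c = '@' ∧ prev ≠ some '\\')) :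
    pvB_go (c :: rs) p 0 start buf prev acc = pvB_go rs (p + 1) 0 start buf (some c) acc := by
  rw [pvB_go]; rw [if_pos rfl, if_neg hc]

theorem pvB_step1_bs (c : Char) (rs : List Char) (p start : Nat) (buf : List Char)
    (prev : Option Char) (acc : List (Int × String)) (hc : c = '\\') :
    pvB_go (c :: rs) p 1 start buf prev acc =
      pvB_go rs (p + 1) 2 start (buf ++ [c]) (some c) acc := by
  rw [pvB_go]; simp [hc]

theorem pvB_step1_sp (c : Char) (rs : List Char) (p start : Nat) (buf : List Char)
    (prev : Option Char) (acc : List (Int × String)) (hc : ¬ c = '\\')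
    (hs : PySem.Chars.isspace c = true) :
    pvB_go (c :: rs) p 1 start buf prev acc =
      pvB_go rs (p + 1) 0 start buf (some c) (acc ++ [((start : Int), String.ofList buf)]) := by
  rw [pvB_go]; simp [hc, hs]

theorem pvB_step1_ch (c : Char) (rs : List Char) (p start : Nat) (buf : List Char)
    (prev : Option Char) (acc : List (Int × String)) (hc : ¬ c = '\\')
    (hs : ¬ PySem.Chars.isspace c = true) :
    pvB_go (c :: rs) p 1 start buf prev acc =
      pvB_go rs (p + 1) 1 start (buf ++ [c]) (some c) acc := by
  rw [pvB_go]; simp [hc, hs]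

theorem pvB_step2 (c : Char) (rs : List Char) (p start : Nat) (buf : List Char)
    (prev : Option Char) (acc : List (Int × String)) :
    pvB_go (c :: rs) p 2 start buf prev acc =
      pvB_go rs (p + 1) 1 start (buf ++ [c]) (some c) acc := by
  rw [pvB_go]; simp

-- drop k = cs[k] :: drop (k+1) with getD
theorem pv_drop_cons (cs : List Char) (k : Nat) (h : k < cs.length) :
    cs.drop k = cs.getD k ' ' :: cs.drop (k + 1) := by
  rw [List.getD_eq_getElem cs ' ' h]
  exact List.drop_eq_getElem_cons h

theorem pv_isspace_not_bs {c : Char} (h : PySem.Chars.isspace c = true) : ¬ c = '\\' := by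
  intro hc; rw [hc] at h; simp [PySem.Chars.isspace] at h

theorem pv_isspace_not_at {c : Char} (h : PySem.Chars.isspace c = true) : ¬ c = '@' := by
  intro hc; rw [hc] at h; simp [PySem.Chars.isspace] at h

-- Command phase: running B's DFA from state 1 at position k consumes exactly A's
-- inner-loop span [k, pvA_findEnd cs k) into buf, then either resumes in state 0 after
-- the terminating whitespace or finishes at end of text.
theorem pvB_cmd (cs : List Char) (n k : Nat) (hn : cs.length - k = n) (hk : k ≤ cs.length)
    (start : Nat) (buf : List Char) (prev : Option Char) (acc : List (Int × String)) :
    pvB_go (cs.drop k) k 1 start buf prev acc =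
      (if pvA_findEnd cs k < cs.length then
        pvB_go (cs.drop (pvA_findEnd cs k + 1)) (pvA_findEnd cs k + 1) 0 start
          (buf ++ (cs.drop k).take (pvA_findEnd cs k - k))
          (some (cs.getD (pvA_findEnd cs k) ' '))
          (acc ++ [((start : Int), String.ofList (buf ++ (cs.drop k).take (pvA_findEnd cs k - k)))])
      else acc ++ [((start : Int), String.ofList (buf ++ (cs.drop k).take (pvA_findEnd cs k - k)))]) := by
  induction n using Nat.strong_induction_on generalizing k buf prev acc with
  | _ n ih =>
  by_cases hkl : k < cs.length
  · have hdrop := pv_drop_cons cs k hkl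
    by_cases hsp : PySem.Chars.isspace (cs.getD k ' ') = true
    · -- terminating whitespace: the command ends here, B emits and resumes in state 0
      have hj : pvA_findEnd cs k = k := by
        rw [pvA_findEnd_step cs k hkl, if_neg (not_not_intro hsp)]
      conv_lhs => rw [hdrop]
      rw [pvB_step1_sp _ _ _ _ _ _ _ (pv_isspace_not_bs hsp) hsp]
      rw [hj, if_pos hkl]
      simp
    · by_cases hbs : cs.getD k ' ' = '\\'
      · by_cases h2 : k + 1 < cs.length
        · -- escape: consume backslash and the next character
          have hj : pvA_findEnd cs k = pvA_findEnd cs (k + 2) := by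
            rw [pvA_findEnd_step cs k hkl, if_pos hsp, if_pos (And.intro hbs h2)]
          have hge := pvA_findEnd_ge cs (k + 2)
          have hdrop2 := pv_drop_cons cs (k + 1) h2
          conv_lhs => rw [hdrop]
          rw [pvB_step1_bs _ _ _ _ _ _ _ hbs]
          conv_lhs => rw [hdrop2]
          rw [pvB_step2]
          rw [ih (cs.length - (k + 2)) (by omega) (k + 2) rfl (by omega)]
          have htake : (cs.drop k).take (pvA_findEnd cs k - k) =
              cs.getD k ' ' :: cs.getD (k + 1) ' ' ::
                (cs.drop (k + 2)).take (pvA_findEnd cs (k + 2) - (k + 2)) := by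
            rw [hdrop, hdrop2, hj]
            have h2' : pvA_findEnd cs (k + 2) - k = (pvA_findEnd cs (k + 2) - (k + 2)) + 1 + 1 := by
              omega
            rw [h2', List.take_succ_cons, List.take_succ_cons]
          rw [htake, hj]
          simp
        · -- lone trailing backslash: consumed as a single final character
          have hj : pvA_findEnd cs k = k + 1 := by
            rw [pvA_findEnd_step cs k hkl, if_pos hsp, if_neg (fun h => h2 h.2),
              pvA_findEnd_stop cs (k + 1) h2]
          conv_lhs => rw [hdrop]
          rw [pvB_step1_bs _ _ _ _ _ _ _ hbs]
          rw [List.drop_eq_nil_of_le (by omega : cs.length ≤ k + 1), pvB_nil]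
          rw [hj, if_neg h2]
          rw [hdrop]
          simp
      · -- ordinary command character
        have hj : pvA_findEnd cs k = pvA_findEnd cs (k + 1) := by
          rw [pvA_findEnd_step cs k hkl, if_pos hsp, if_neg (fun h => hbs h.1)]
        have hge := pvA_findEnd_ge cs (k + 1)
        conv_lhs => rw [hdrop]
        rw [pvB_step1_ch _ _ _ _ _ _ _ hbs hsp]
        rw [ih (cs.length - (k + 1)) (by omega) (k + 1) rfl (by omega)]
        have htake : (cs.drop k).take (pvA_findEnd cs k - k) =
            cs.getD k ' ' :: (cs.drop (k + 1)).take (pvA_findEnd cs (k + 1) - (k + 1)) := by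
          rw [hdrop, hj]
          have h1' : pvA_findEnd cs (k + 1) - k = (pvA_findEnd cs (k + 1) - (k + 1)) + 1 := by
            omega
          rw [h1', List.take_succ_cons]
        rw [htake, hj]
        simp
  · -- end of text inside a command: B emits buf, A's inner loop stops at k
    have hk' : k = cs.length := by omega
    have hj : pvA_findEnd cs k = k := pvA_findEnd_stop cs k hkl
    rw [List.drop_eq_nil_of_le (by omega), pvB_nil]
    rw [hj, if_neg hkl]
    simp

-- Outer phase: B's DFA in state 0 at position i, with prev agreeing with cs about a
-- preceding backslash, computes acc ++ A's remaining scan.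
theorem pvB_out (cs : List Char) (n i : Nat) (hn : cs.length - i = n) (hi : i ≤ cs.length)
    (prev : Option Char)
    (hprev : (prev = some '\\') ↔ (0 < i ∧ cs.getD (i - 1) ' ' = '\\'))
    (start : Nat) (buf : List Char) (acc : List (Int × String)) :
    pvB_go (cs.drop i) i 0 start buf prev acc = acc ++ pvA_go cs i := by
  induction n using Nat.strong_induction_on generalizing i prev start buf acc with
  | _ n ih =>
  by_cases hil : i < cs.length
  · have hdrop := pv_drop_cons cs i hil
    by_cases hat : cs.getD i ' ' = '@' ∧ prev ≠ some '\\'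
    · -- a command starts here
      have hnotesc : ¬ (0 < i ∧ cs.getD (i - 1) ' ' = '\\') := fun h => hat.2 (hprev.mpr h)
      have hstart : pvA_isStart cs i = true := by
        unfold pvA_isStart
        rw [if_neg (by rw [not_or]; exact ⟨by omega, not_not_intro hat.1⟩), if_neg hnotesc]
      have hge := pvA_findEnd_ge cs (i + 1)
      have hle := pvA_findEnd_le cs (i + 1) (by omega)
      rw [hdrop, pvB_step0_at _ _ _ _ _ _ _ hat]
      rw [pvB_cmd cs (cs.length - (i + 1)) (i + 1) rfl (by omega)]
      rw [pvA_go_hit cs i hil ⟨hat.1, hstart⟩]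
      have hslice : PySem.List.slice cs (some (i : Int))
            (some ((pvA_findEnd cs (i + 1) : Nat) : Int)) =
          '@' :: (cs.drop (i + 1)).take (pvA_findEnd cs (i + 1) - (i + 1)) := by
        rw [PySem.List.slice_natCast, hdrop, hat.1]
        have h1' : pvA_findEnd cs (i + 1) - i = (pvA_findEnd cs (i + 1) - (i + 1)) + 1 := by
          omega
        rw [h1', List.take_succ_cons]
      by_cases hjl : pvA_findEnd cs (i + 1) < cs.length
      · rw [if_pos hjl]
        have hspj := pvA_findEnd_isspace cs (i + 1) hjl
        rw [ih (cs.length - (pvA_findEnd cs (i + 1) + 1)) (by omega)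
            (pvA_findEnd cs (i + 1) + 1) rfl (by omega) _
            (by simp)]
        rw [pvA_go_miss cs (pvA_findEnd cs (i + 1)) hjl
            (by intro h; exact pv_isspace_not_at hspj h.1)]
        rw [hslice]
        simp
      · rw [if_neg hjl]
        rw [pvA_go_stop cs (pvA_findEnd cs (i + 1)) hjl]
        rw [hslice]
        simp
    · -- no command here: both sides advance one character
      have hmiss : ¬ (cs.getD i ' ' = '@' ∧ pvA_isStart cs i = true) := by
        intro h
        rcases not_and_or.mp hat with h1 | h1
        · exact h1 h.1
        · have h2 := not_not.mp h1
          have := hprev.mp h2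
          unfold pvA_isStart at h
          rw [if_neg (by rw [not_or]; exact ⟨by omega, not_not_intro h.1⟩), if_pos this] at h
          exact absurd h.2 (by simp)
      rw [hdrop, pvB_step0_skip _ _ _ _ _ _ _ hat]
      rw [ih (cs.length - (i + 1)) (by omega) (i + 1) rfl (by omega) _
          (by constructor
              · intro h; exact ⟨by omega, by simpa using h⟩
              · intro h; simpa using h.2)]
      rw [pvA_go_miss cs i hil hmiss]
  · rw [List.drop_eq_nil_of_le (by omega), pvB_nil]
    rw [pvA_go_stop cs i hil]
    simp

-- ===== VERDICT (by name: the statement is the Claim_ definition above) =====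
theorem find_at_commands_in_text_spec : Claim_equal_find_at_commands_in_text := by
  intro text _
  unfold Spec_find_at_commands_in_text find_at_commands_in_text find_at_commands_in_text_alt
  have := pvB_out text.toList (text.toList.length) 0 (by omega) (by omega) none
    (by simp) 0 [] []
  simpa using this.symm
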